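-- pv_equiv track=rewrite | github.com/jkowalleck/fork_purl-spec | tests/grammar/conftest.py | _normalize_abnf
-- ===== SOURCE A (Python) =====
-- def _strip_comment(line: str) -> str:
--     """Strip a trailing ABNF comment (``; …``) from a line."""
--     in_quote = False
--     for i, ch in enumerate(line):
--         if ch == '"':
--             in_quote = not in_quote
--         elif ch == ";" and not in_quote:
--             return line[:i].rstrip()
--     return line
--
-- def _normalize_abnf(text: str) -> list[str]:
--     """
--     Convert raw multi-line ABNF text into a list of single-line rule strings,
--     stripping comments so that the ``abnf`` library can parse them.
--
--     Rules with indented continuation lines (RFC 5234 §2.1) are joined into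
--     one flat string.  Comment-only lines and blank lines are discarded.
--     """
--     rules: list[str] = []
--     current: str | None = None
--
--     for raw_line in text.split("\n"):
--         stripped = raw_line.rstrip()
--
--         # Blank line → flush
--         if not stripped:
--             if current is not None:
--                 rules.append(current)
--                 current = None
--             continue
--
--         # Comment-only line
--         if stripped.lstrip().startswith(";"):
--             # Top-level comment → flush current rule
--             if not raw_line[0].isspace() and current is not None:
--                 rules.append(current)
--                 current = None
--             continue
--
--         line_no_comment = _strip_comment(stripped)
--         if not line_no_comment.strip():
--             continue
--
--         if not raw_line[0].isspace():
--             # Start of a new rule definition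
--             if current is not None:
--                 rules.append(current)
--             current = line_no_comment.rstrip()
--         else:
--             # Continuation of the current rule
--             if current is not None:
--                 current = current + " " + line_no_comment.strip()
--
--     if current is not None:
--         rules.append(current)
--
--     return [r for r in rules if r.strip()]
-- ===== SOURCE B (Python) =====
-- def _strip_comment(line: str) -> str:
--     """Strip a trailing ABNF comment (``; ...``) from a line."""
--     in_quote = False
--     for i, ch in enumerate(line):
--         if ch == '"':
--             in_quote = not in_quote
--         elif ch == ";" and not in_quote:
--             return line[:i].rstrip()
--     return line
--
--
-- def _normalize_abnf(text: str) -> list[str]: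
--     # Cursor-based recursive-descent over the line list: instead of a state machine
--     # carrying an open rule, find each definition line and greedily consume its
--     # indented continuation block with an inner loop, emitting the joined rule at once.
--     lines = text.split("\n")
--     n = len(lines)
--     out: list[str] = []
--     i = 0
--     while i < n:
--         raw = lines[i]
--         stripped = raw.rstrip()
--         i += 1
--         # Anything that cannot open a rule is passed over.
--         if not stripped or stripped.lstrip().startswith(";") or raw[0].isspace():
--             continue
--         piece = _strip_comment(stripped)
--         if not piece.strip():
--             continue
--         parts = [piece.rstrip()]
--         # Consume this rule's continuation block: indented lines up to the next
--         # blank line or non-indented line.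
--         while i < n:
--             raw2 = lines[i]
--             s2 = raw2.rstrip()
--             if not s2 or not raw2[0].isspace():
--                 break
--             i += 1
--             if s2.lstrip().startswith(";"):
--                 continue
--             p2 = _strip_comment(s2)
--             if p2.strip():
--                 parts.append(p2.strip())
--         rule = " ".join(parts)
--         if rule.strip():
--             out.append(rule)
--     return out
-- ===== Notes on version B (the rewrite author's own statement) =====
-- stated objective: alternative
-- what changed: A's single-pass state machine that threads an optional open rule through one loop is replaced by a cursor-based two-level scan: an outer loop skips to each definition line and an inner loop greedily consumes that rule's indented continuation block, emitting the joined rule at once.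
import Mathlib
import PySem

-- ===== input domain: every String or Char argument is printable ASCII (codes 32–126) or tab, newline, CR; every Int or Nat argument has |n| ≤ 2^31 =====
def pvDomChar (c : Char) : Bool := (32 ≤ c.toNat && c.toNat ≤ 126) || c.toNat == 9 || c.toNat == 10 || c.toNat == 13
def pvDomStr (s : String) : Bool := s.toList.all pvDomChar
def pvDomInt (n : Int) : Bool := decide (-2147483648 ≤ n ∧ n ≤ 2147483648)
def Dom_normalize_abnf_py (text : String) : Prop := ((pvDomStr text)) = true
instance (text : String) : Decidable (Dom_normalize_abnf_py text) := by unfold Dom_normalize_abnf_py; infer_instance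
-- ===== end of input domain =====

-- B replaces A's single-pass state machine (an optional open rule threaded through one loop)
-- by a cursor-based two-level scan: an outer loop finds each definition line and an inner loop
-- greedily consumes that rule's indented continuation block; objective: alternative structure, same cost.


-- ===== PORT A =====
-- _strip_comment, shared verbatim by A and B (B's Python keeps it unchanged):
-- acc holds the consumed prefix reversed, so acc.reverse = line[:i].
def stripCommentGo : List Char → Bool → List Char → List Char
  | [], _, acc => acc.reverse
  | c :: rest, inq, acc =>
    if c = '"' then stripCommentGo rest (!inq) (c :: acc)
    else if c = ';' ∧ inq = false then PySem.Chars.rstrip acc.reverse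
    else stripCommentGo rest inq (c :: acc)

def stripComment (line : List Char) : List Char := stripCommentGo line false []

-- raw_line[0].isspace(); both programs reach it only on lines with nonempty rstrip, hence nonempty
-- (Python would raise IndexError on "", which is unreachable in both programs).
def firstIsSpace (cs : List Char) : Bool :=
  match cs with
  | [] => false
  | c :: _ => PySem.Chars.strIsspace [c]

-- text.split("\n"); split? is `some` whenever the separator is nonempty.
def splitNL (cs : List Char) : List (List Char) := (PySem.Chars.split? cs ['\n']).getD []

-- A's loop: state = (rules so far, current : Option rule string); final flush in the base case.
def loopA : List (List Char) → List (List Char) → Option (List Char) → List (List Char)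
  | [], rules, cur =>
    match cur with
    | some c => rules ++ [c]
    | none => rules
  | raw :: rest, rules, cur =>
    let stripped := PySem.Chars.rstrip raw
    if stripped = [] then
      match cur with
      | some c => loopA rest (rules ++ [c]) none
      | none => loopA rest rules none
    else if PySem.Chars.startswith (PySem.Chars.lstrip stripped) [';'] = true then
      if firstIsSpace raw = false then
        match cur with
        | some c => loopA rest (rules ++ [c]) none
        | none => loopA rest rules cur
      else loopA rest rules cur
    else
      let lnc := stripComment stripped
      if PySem.Chars.strip lnc = [] then loopA rest rules cur
      else if firstIsSpace raw = false then
        match cur with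
        | some c => loopA rest (rules ++ [c]) (some (PySem.Chars.rstrip lnc))
        | none => loopA rest rules (some (PySem.Chars.rstrip lnc))
      else
        match cur with
        | some c => loopA rest rules (some (c ++ ' ' :: PySem.Chars.strip lnc))
        | none => loopA rest rules none

def normalize_abnf_py (text : String) : List String :=
  ((loopA (splitNL text.toList) [] none).filter
      (fun r => !(PySem.Chars.strip r).isEmpty)).map String.ofList

-- ===== PORT B =====
-- B's inner while-loop: consume the continuation block of the open rule; returns the
-- collected pieces and the remaining (suffix of the) line list at which it stopped.
def innerB : List (List Char) → List (List Char) → List (List Char) × List (List Char)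
  | [], parts => (parts, [])
  | raw :: rest, parts =>
    let s2 := PySem.Chars.rstrip raw
    if s2 = [] ∨ firstIsSpace raw = false then (parts, raw :: rest)
    else if PySem.Chars.startswith (PySem.Chars.lstrip s2) [';'] = true then innerB rest parts
    else
      let p2 := stripComment s2
      if PySem.Chars.strip p2 = [] then innerB rest parts
      else innerB rest (parts ++ [PySem.Chars.strip p2])

-- the inner loop only advances the cursor (needed by outerB's termination)
theorem innerB_len : ∀ (lines parts : List (List Char)),
    (innerB lines parts).2.length ≤ lines.length := by
  intro lines
  induction lines with
  | nil => intro parts; simp [innerB]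
  | cons raw rest ih =>
      intro parts
      simp only [innerB]
      split_ifs with h1 h2 h3
      · simp
      · exact le_trans (ih parts) (by simp)
      · exact le_trans (ih parts) (by simp)
      · exact le_trans (ih _) (by simp)

def joinSp (b : List (List Char)) : List Char := PySem.Chars.join [' '] b

-- B's outer while-loop: skip anything that cannot open a rule; at a definition line
-- consume its continuation block with innerB and emit the joined rule at once.
def outerB : List (List Char) → List (List Char)
  | [] => []
  | raw :: rest =>
    let stripped := PySem.Chars.rstrip raw
    if stripped = [] ∨ PySem.Chars.startswith (PySem.Chars.lstrip stripped) [';'] = true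
        ∨ firstIsSpace raw = true then
      outerB rest
    else
      let piece := stripComment stripped
      if PySem.Chars.strip piece = [] then outerB rest
      else
        let r := innerB rest [PySem.Chars.rstrip piece]
        (if (PySem.Chars.strip (joinSp r.1)).isEmpty then [] else [joinSp r.1]) ++ outerB r.2
termination_by lines => lines.length
decreasing_by
  · simp
  · simp
  · have h := innerB_len rest [PySem.Chars.rstrip (stripComment (PySem.Chars.rstrip raw))]
    simp only [List.length_cons]
    omega

def normalize_abnf_py_alt (text : String) : List String :=
  (outerB (splitNL text.toList)).map String.ofList

-- ===== PRECONDITION & SPEC =====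
def Spec_normalize_abnf_py (text : String) (out : List String) : Prop := out = normalize_abnf_py_alt text
instance (text : String) (out : List String) : Decidable (Spec_normalize_abnf_py text out) := by unfold Spec_normalize_abnf_py; infer_instance

-- ===== CLAIM (what is proved, stated in full; the proofs are below) =====
def Claim_equal_normalize_abnf_py : Prop := ∀ (text : String), Dom_normalize_abnf_py text → Spec_normalize_abnf_py text (normalize_abnf_py text)

-- ===== LEMMAS AND PROOFS =====

theorem joinSp_singleton (s : List Char) : joinSp [s] = s := PySem.Chars.join_singleton _ _

-- joining a block extended on the right (the block is nonempty, so the separator appears)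
theorem joinSp_snoc (s : List Char) : ∀ (b : List (List Char)) (x : List Char),
    joinSp ((x :: b) ++ [s]) = joinSp (x :: b) ++ ' ' :: s := by
  intro b
  induction b with
  | nil =>
      intro x
      simp [joinSp, PySem.Chars.join_cons_cons, PySem.Chars.join_singleton]
  | cons y r ih =>
      intro x
      have ihy := ih y
      simp only [List.cons_append] at ihy ⊢
      simp only [joinSp] at ihy ⊢
      rw [PySem.Chars.join_cons_cons, ihy, PySem.Chars.join_cons_cons]
      simp [List.append_assoc]

-- A's loop appends flushed rules on the right, so the accumulator factors out
theorem loopA_append : ∀ (lines rules : List (List Char)) (cur : Option (List Char)),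
    loopA lines rules cur = rules ++ loopA lines [] cur := by
  intro lines
  induction lines with
  | nil => intro rules cur; cases cur <;> simp [loopA]
  | cons raw rest ih =>
      intro rules cur
      simp only [loopA]
      split_ifs <;> cases cur <;>
        (try dsimp only) <;> rw [ih] <;> try (rw [ih ([] ++ [_]) _]; simp [List.append_assoc])

theorem rstrip_cons_of_nonspace {a : Char} (xs : List Char) (h : PySem.Chars.isspace a = false) :
    PySem.Chars.rstrip (a :: xs) = a :: PySem.Chars.rstrip xs := by
  simp only [PySem.Chars.rstrip, List.reverse_cons, List.dropWhile_append]
  by_cases he : (List.dropWhile PySem.Chars.isspace xs.reverse).isEmpty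
  · simp [h, List.isEmpty_iff.mp he]
  · simp [he]

theorem lstrip_cons_of_nonspace {a : Char} (xs : List Char) (h : PySem.Chars.isspace a = false) :
    PySem.Chars.lstrip (a :: xs) = a :: xs := by
  simp [PySem.Chars.lstrip, h]

-- _strip_comment returns the whole line or the rstrip of a prefix extending the consumed part
theorem stripCommentGo_spec : ∀ (rest : List Char) (inq : Bool) (acc : List Char),
    stripCommentGo rest inq acc = acc.reverse ++ rest ∨
      ∃ pre, stripCommentGo rest inq acc = PySem.Chars.rstrip (acc.reverse ++ pre) := by
  intro rest
  induction rest with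
  | nil => intro inq acc; left; simp [stripCommentGo]
  | cons c r ih =>
      intro inq acc
      simp only [stripCommentGo]
      split_ifs with h1 h2
      · rcases ih (!inq) (c :: acc) with h | ⟨pre, h⟩
        · left; simpa using h
        · right; exact ⟨c :: pre, by simpa using h⟩
      · right; exact ⟨[], by simp⟩
      · rcases ih inq (c :: acc) with h | ⟨pre, h⟩
        · left; simpa using h
        · right; exact ⟨c :: pre, by simpa using h⟩

-- a line whose first char is neither whitespace nor ';' cannot strip to empty after
-- comment removal (the branch both programs have for that case is dead)
theorem strip_stripComment_ne_nil {a : Char} (xs : List Char)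
    (ha : PySem.Chars.isspace a = false) (hsc : a ≠ ';') :
    PySem.Chars.strip (stripComment (a :: xs)) ≠ [] := by
  have step : stripComment (a :: xs) = stripCommentGo xs (a = '"') [a] := by
    by_cases hq : a = '"' <;> simp [stripComment, stripCommentGo, hq, hsc]
  have key : ∃ t, stripComment (a :: xs) = a :: t := by
    rcases stripCommentGo_spec xs (a = '"') [a] with h | ⟨pre, h⟩
    · exact ⟨xs, by rw [step, h]; simp⟩
    · refine ⟨PySem.Chars.rstrip pre, ?_⟩
      rw [step, h]
      simpa using rstrip_cons_of_nonspace pre ha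
  obtain ⟨t, ht⟩ := key
  rw [ht]
  simp [PySem.Chars.strip, lstrip_cons_of_nonspace _ ha, rstrip_cons_of_nonspace _ ha]

-- the main correspondence: A's filtered state machine vs B's nested scan
theorem main_corr : ∀ (lines : List (List Char)),
    ((loopA lines [] none).filter (fun r => !(PySem.Chars.strip r).isEmpty) = outerB lines) ∧
    (∀ parts : List (List Char), parts ≠ [] →
      (loopA lines [] (some (joinSp parts))).filter (fun r => !(PySem.Chars.strip r).isEmpty) =
        (if (PySem.Chars.strip (joinSp (innerB lines parts).1)).isEmpty then []
          else [joinSp (innerB lines parts).1]) ++ outerB (innerB lines parts).2) := by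
  intro lines
  induction lines with
  | nil =>
      constructor
      · simp [loopA, outerB]
      · intro parts hp
        by_cases he : (PySem.Chars.strip (joinSp parts)).isEmpty <;>
          simp [loopA, innerB, outerB, he]
  | cons raw rest ih =>
      obtain ⟨ihP, ihQ⟩ := ih
      -- the dead branch: a non-indented non-comment line cannot strip to empty after
      -- comment removal
      have dead : PySem.Chars.rstrip raw ≠ [] →
          ¬ PySem.Chars.startswith (PySem.Chars.lstrip (PySem.Chars.rstrip raw)) [';'] = true →
          firstIsSpace raw = false →
          PySem.Chars.strip (stripComment (PySem.Chars.rstrip raw)) ≠ [] := by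
        intro h1 h2 h4
        match hr : raw with
        | [] => exact absurd rfl h1
        | a :: xs =>
          have ha : PySem.Chars.isspace a = false := by
            simpa [firstIsSpace, PySem.Chars.strIsspace] using h4
          have hst : PySem.Chars.rstrip (a :: xs) = a :: PySem.Chars.rstrip xs :=
            rstrip_cons_of_nonspace xs ha
          have hsc : a ≠ ';' := by
            intro hsc
            apply h2
            rw [hst, lstrip_cons_of_nonspace _ ha]
            simp [PySem.Chars.startswith, List.isPrefixOf, hsc]
          rw [hst]
          exact strip_stripComment_ne_nil _ ha hsc
      constructor
      · -- cur = none
        simp only [loopA, outerB]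
        by_cases h1 : PySem.Chars.rstrip raw = []
        · simpa [h1] using ihP
        · by_cases h2 : PySem.Chars.startswith (PySem.Chars.lstrip (PySem.Chars.rstrip raw)) [';'] = true
          · simpa [h1, h2, ite_self] using ihP
          · by_cases h3 : PySem.Chars.strip (stripComment (PySem.Chars.rstrip raw)) = []
            · cases hfs : firstIsSpace raw <;> simpa [h1, h2, h3, hfs] using ihP
            · cases hfs : firstIsSpace raw
              · have hq := ihQ [PySem.Chars.rstrip (stripComment (PySem.Chars.rstrip raw))] (by simp)
                rw [joinSp_singleton] at hq
                simpa [h1, h2, h3, hfs] using hq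
              · simpa [h1, h2, h3, hfs] using ihP
      · -- cur = some (joinSp parts)
        intro parts hp
        obtain ⟨p0, ps, rfl⟩ : ∃ p0 ps, parts = p0 :: ps := by
          cases parts with
          | nil => exact absurd rfl hp
          | cons a b => exact ⟨a, b, rfl⟩
        simp only [loopA, innerB]
        by_cases h1 : PySem.Chars.rstrip raw = []
        · -- blank line: A flushes; B's inner breaks and the outer scan skips the blank line
          rw [outerB.eq_def]
          simp only [h1, if_true, true_or, List.nil_append]
          rw [loopA_append, List.filter_append, ihP]
          by_cases he : (PySem.Chars.strip (joinSp (p0 :: ps))).isEmpty <;>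
            simp [he]
        · by_cases h2 : PySem.Chars.startswith (PySem.Chars.lstrip (PySem.Chars.rstrip raw)) [';'] = true
          · cases hfs : firstIsSpace raw
            · -- top-level comment: A flushes; B's inner breaks, the outer scan skips the comment
              rw [outerB.eq_def]
              simp only [h1, h2, hfs, if_true, if_false, false_or, or_true, List.nil_append]
              rw [loopA_append, List.filter_append, ihP]
              by_cases he : (PySem.Chars.strip (joinSp (p0 :: ps))).isEmpty <;>
                simp [he]
            · -- indented comment: both sides keep scanning
              simpa [h1, h2, hfs] using ihQ (p0 :: ps) (by simp)
          · by_cases h3 : PySem.Chars.strip (stripComment (PySem.Chars.rstrip raw)) = []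
            · cases hfs : firstIsSpace raw
              · exact absurd h3 (dead h1 h2 hfs)
              · -- indented line empty after comment removal: both sides keep scanning
                simpa [h1, h2, h3, hfs] using ihQ (p0 :: ps) (by simp)
            · cases hfs : firstIsSpace raw
              · -- a new definition line: A flushes and reopens; B's inner breaks and the
                -- outer scan starts the new rule
                have hq := ihQ [PySem.Chars.rstrip (stripComment (PySem.Chars.rstrip raw))] (by simp)
                rw [joinSp_singleton] at hq
                rw [outerB.eq_def]
                simp only [h1, h2, h3, hfs, if_true, if_false,
                  false_or, or_false, Bool.false_eq_true, List.nil_append]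
                rw [loopA_append, List.filter_append, hq]
                by_cases he : (PySem.Chars.strip (joinSp (p0 :: ps))).isEmpty <;>
                  simp [he]
              · -- continuation line: A extends the open rule, B's inner appends the piece
                have hsn := joinSp_snoc (PySem.Chars.strip (stripComment (PySem.Chars.rstrip raw))) ps p0
                have hq := ihQ ((p0 :: ps) ++ [PySem.Chars.strip (stripComment (PySem.Chars.rstrip raw))]) (by simp)
                rw [hsn] at hq
                simpa [h1, h2, h3, hfs] using hq

-- ===== VERDICT (by name: the statement is the Claim_ definition above) =====
theorem normalize_abnf_py_spec : Claim_equal_normalize_abnf_py := by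
  intro text _
  unfold Spec_normalize_abnf_py normalize_abnf_py normalize_abnf_py_alt
  rw [(main_corr (splitNL text.toList)).1]
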